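-- pv_equiv track=rewrite | github.com/lauralvd01/AdventOfCode | Python/2024/day15.py | can_move_forward
-- ===== SOURCE A (Python) =====
-- def can_move_forward(robot, move, map) :
--     i,j = robot
--     next_i, next_j = i+move[0], j+move[1]
--     if 0 < next_i < len(map)-1 and 1 < next_j < len(map[0])-2 :
--         if map[next_i][next_j] == '#' :
--             return False
--         if map[next_i][next_j] == '.' :
--             return True
--         if move == (0,-1) or move == (0,1) :
--             return can_move_forward((next_i, next_j), move, map)
--         if map[next_i][next_j] == '[' :
--             return can_move_forward((next_i, next_j), move, map) and can_move_forward((next_i, next_j+1), move, map)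
--         if map[next_i][next_j] == ']' :
--             return can_move_forward((next_i, next_j-1), move, map) and can_move_forward((next_i, next_j), move, map)
--     return False
-- ===== SOURCE B (Python) =====
-- def can_move_forward(robot, move, map):
--     # Iterative frontier sweep with per-level dedup instead of A's tree recursion.
--     di, dj = move
--     frontier = [robot]
--     while frontier:
--         new = []
--         for i, j in frontier:
--             ni, nj = i + di, j + dj
--             if not (0 < ni < len(map) - 1 and 1 < nj < len(map[0]) - 2):
--                 return False
--             c = map[ni][nj]
--             if c == '#':
--                 return False
--             if c == '.':
--                 continue
--             if (di, dj) == (0, -1) or (di, dj) == (0, 1):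
--                 new.append((ni, nj))
--             elif c == '[':
--                 new += [(ni, nj), (ni, nj + 1)]
--             elif c == ']':
--                 new += [(ni, nj - 1), (ni, nj)]
--             else:
--                 return False
--         frontier = list(dict.fromkeys(new))
--     return True
-- ===== Notes on version B (the rewrite author's own statement) =====
-- stated objective: alternative
-- what changed: A's branching tree recursion (which re-explores a box cell once per path to it) is replaced by an iterative frontier sweep that advances all pushed cells one level at a time and deduplicates each frontier, avoiding A's exponential blow-up on stacked overlapping boxes; on typical inputs the cost is the same.
-- outside the precondition, e.g. on can_move_forward((1, 3), (0, 0), ['.......', '.......', '.......']): A returns True, B returns True; on can_move_forward((-5, 0), (1, 0), ['#####', '##', '#####']): A returns False, B returns False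
import Mathlib
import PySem

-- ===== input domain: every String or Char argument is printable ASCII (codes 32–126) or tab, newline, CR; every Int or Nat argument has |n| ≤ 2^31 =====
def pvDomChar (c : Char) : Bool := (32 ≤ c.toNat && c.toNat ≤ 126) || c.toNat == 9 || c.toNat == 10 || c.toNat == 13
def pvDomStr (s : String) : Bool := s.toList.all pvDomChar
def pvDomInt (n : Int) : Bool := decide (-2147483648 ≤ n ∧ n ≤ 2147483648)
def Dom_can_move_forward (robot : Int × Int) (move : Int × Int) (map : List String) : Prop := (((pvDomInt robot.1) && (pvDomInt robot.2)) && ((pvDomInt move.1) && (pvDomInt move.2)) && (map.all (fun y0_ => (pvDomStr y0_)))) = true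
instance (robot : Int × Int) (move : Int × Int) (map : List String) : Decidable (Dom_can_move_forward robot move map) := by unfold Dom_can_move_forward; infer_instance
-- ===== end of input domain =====

-- B replaces A's tree recursion by an iterative frontier sweep with per-level dedup; equivalence of the return value is proved on Pre_ (nonzero move, non-ragged map).

-- ===== PORT A =====
-- shared grid accessor: map[i][j] (the default '?' is only reached outside Pre_, where nothing is claimed)
def pvCell (map : List String) (i j : Int) : Char :=
  (PySem.Str.pyGet? ((PySem.List.pyGet? map i).getD "") j).getD '?'

-- distance to the wall the move drives towards; it strictly shrinks at every recursive call of A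
-- (and every loop iteration of B) whenever move ≠ (0,0), so 'pvMeasure + 1' bounds the recursion depth
def pvMeasure (robot : Int × Int) (move : Int × Int) (map : List String) : Nat :=
  if 0 < move.1 then ((map.length : Int) - 1 - robot.1).toNat
  else if move.1 < 0 then robot.1.toNat
  else if 0 < move.2 then (((map.headD "").toList.length : Int) - robot.2).toNat
  else robot.2.toNat

-- A's recursion, step for step; the Nat argument is fuel, a pure totality guard: it is hit only
-- with move = (0,0) (outside Pre_), where Python A itself does not terminate on box cells
def canA_go (move : Int × Int) (map : List String) : Nat → (Int × Int) → Bool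
  | 0, _ => false
  | n + 1, p =>
    if 0 < p.1 + move.1 ∧ p.1 + move.1 < (map.length : Int) - 1 ∧
       1 < p.2 + move.2 ∧ p.2 + move.2 < ((map.headD "").toList.length : Int) - 2 then
      if pvCell map (p.1 + move.1) (p.2 + move.2) = '#' then false
      else if pvCell map (p.1 + move.1) (p.2 + move.2) = '.' then true
      else if (move.1 = 0 ∧ move.2 = -1) ∨ (move.1 = 0 ∧ move.2 = 1) then
        canA_go move map n (p.1 + move.1, p.2 + move.2)
      else if pvCell map (p.1 + move.1) (p.2 + move.2) = '[' then
        canA_go move map n (p.1 + move.1, p.2 + move.2) &&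
        canA_go move map n (p.1 + move.1, p.2 + move.2 + 1)
      else if pvCell map (p.1 + move.1) (p.2 + move.2) = ']' then
        canA_go move map n (p.1 + move.1, p.2 + move.2 - 1) &&
        canA_go move map n (p.1 + move.1, p.2 + move.2)
      else false
    else false

def can_move_forward (robot : Int × Int) (move : Int × Int) (map : List String) : Bool :=
  canA_go move map (pvMeasure robot move map + 1) robot

-- ===== PORT B =====
-- one frontier cell of B's loop body: none = "return False", some cs = cells pushed onto the next frontier
def pvExpand (move : Int × Int) (map : List String) (p : Int × Int) : Option (List (Int × Int)) :=
  if 0 < p.1 + move.1 ∧ p.1 + move.1 < (map.length : Int) - 1 ∧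
     1 < p.2 + move.2 ∧ p.2 + move.2 < ((map.headD "").toList.length : Int) - 2 then
    if pvCell map (p.1 + move.1) (p.2 + move.2) = '#' then none
    else if pvCell map (p.1 + move.1) (p.2 + move.2) = '.' then some []
    else if (move.1 = 0 ∧ move.2 = -1) ∨ (move.1 = 0 ∧ move.2 = 1) then
      some [(p.1 + move.1, p.2 + move.2)]
    else if pvCell map (p.1 + move.1) (p.2 + move.2) = '[' then
      some [(p.1 + move.1, p.2 + move.2), (p.1 + move.1, p.2 + move.2 + 1)]
    else if pvCell map (p.1 + move.1) (p.2 + move.2) = ']' then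
      some [(p.1 + move.1, p.2 + move.2 - 1), (p.1 + move.1, p.2 + move.2)]
    else none
  else none

-- the inner 'for' loop of B: process the whole frontier, an early 'return False' is 'none'
def pvExpandAll (move : Int × Int) (map : List String) : List (Int × Int) → Option (List (Int × Int))
  | [] => some []
  | p :: ps =>
    match pvExpand move map p with
    | none => none
    | some cs =>
      match pvExpandAll move map ps with
      | none => none
      | some rest => some (cs ++ rest)

-- the outer 'while frontier' loop of B, next frontier deduplicated (list(dict.fromkeys(new)));
-- the Nat argument is fuel, a pure totality guard hit only with move = (0,0), outside Pre_
def pvLoopGo (move : Int × Int) (map : List String) : Nat → List (Int × Int) → Bool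
  | _, [] => true
  | 0, _ :: _ => false
  | n + 1, p :: ps =>
    match pvExpandAll move map (p :: ps) with
    | none => false
    | some new => pvLoopGo move map n (PySem.List.dedup new)

def can_move_forward_alt (robot : Int × Int) (move : Int × Int) (map : List String) : Bool :=
  pvLoopGo move map (pvMeasure robot move map + 1) [robot]

-- ===== PRECONDITION & SPEC =====
-- Pre_ excludes the zero move (0,0), on which A recurses without progress (RecursionError whenever the target cell is a box half), and maps that can be indexed (≥ 3 rows, first row ≥ 5 wide) but have an interior row shorter than the first row requires, on which A can raise IndexError; on the excluded inputs where A does return, B returns the same value.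
def Pre_can_move_forward (robot : Int × Int) (move : Int × Int) (map : List String) : Prop :=
  move ≠ (0, 0) ∧
    (map.length ≤ 2 ∨ (map.headD "").length ≤ 4 ∨
      ∀ row ∈ (map.drop 1).dropLast, (map.headD "").length ≤ row.length + 2)
instance (robot : Int × Int) (move : Int × Int) (map : List String) : Decidable (Pre_can_move_forward robot move map) := by unfold Pre_can_move_forward; infer_instance

def pvWitness_can_move_forward : (Int × Int) × (Int × Int) × List String :=
  ((1, 3), (1, 0), ["#######", "#..[].#", "#.....#", "#######"])

def Spec_can_move_forward (robot : Int × Int) (move : Int × Int) (map : List String) (out : Bool) : Prop := out = can_move_forward_alt robot move map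
instance (robot : Int × Int) (move : Int × Int) (map : List String) (out : Bool) : Decidable (Spec_can_move_forward robot move map out) := by unfold Spec_can_move_forward; infer_instance

-- ===== CLAIM (what is proved, stated in full; the proofs are below) =====
def Claim_equal_can_move_forward : Prop := ∀ (robot : Int × Int) (move : Int × Int) (map : List String), Dom_can_move_forward robot move map → Pre_can_move_forward robot move map → Spec_can_move_forward robot move map (can_move_forward robot move map)

-- ===== LEMMAS AND PROOFS =====

-- each pushed cell is strictly closer to the wall than its parent
theorem pvMeasure_lt (move : Int × Int) (map : List String) (p : Int × Int) (j : Int)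
    (hz : ¬ (move.1 = 0 ∧ move.2 = 0))
    (h1 : 0 < p.1 + move.1 ∧ p.1 + move.1 < (map.length : Int) - 1 ∧
          1 < p.2 + move.2 ∧ p.2 + move.2 < ((map.headD "").toList.length : Int) - 2)
    (hj : j = p.2 + move.2 ∨
          (¬ ((move.1 = 0 ∧ move.2 = -1) ∨ (move.1 = 0 ∧ move.2 = 1)) ∧
            (j = p.2 + move.2 + 1 ∨ j = p.2 + move.2 - 1))) :
    pvMeasure (p.1 + move.1, j) move map < pvMeasure p move map := by
  simp only [pvMeasure]; split_ifs <;> omega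

theorem pvExpand_measure (move : Int × Int) (map : List String) (p : Int × Int)
    (hz : ¬ (move.1 = 0 ∧ move.2 = 0)) (cs : List (Int × Int))
    (h : pvExpand move map p = some cs) :
    ∀ c ∈ cs, pvMeasure c move map < pvMeasure p move map := by
  unfold pvExpand at h
  split_ifs at h with h1 h2 h3 h4 h5 h6
  all_goals first
    | exact Option.noConfusion h
    | (injection h with h; subst h)
  all_goals intro c hc
  · exact absurd hc (List.not_mem_nil)
  · rw [List.mem_singleton] at hc
    subst hc; exact pvMeasure_lt move map p _ hz h1 (Or.inl rfl)
  · rw [List.mem_cons, List.mem_singleton] at hc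
    rcases hc with rfl | rfl
    · exact pvMeasure_lt move map p _ hz h1 (Or.inl rfl)
    · exact pvMeasure_lt move map p _ hz h1 (Or.inr ⟨h4, Or.inl rfl⟩)
  · rw [List.mem_cons, List.mem_singleton] at hc
    rcases hc with rfl | rfl
    · exact pvMeasure_lt move map p _ hz h1 (Or.inr ⟨h4, Or.inr rfl⟩)
    · exact pvMeasure_lt move map p _ hz h1 (Or.inl rfl)

theorem pvExpandAll_some (move : Int × Int) (map : List String) (l new : List (Int × Int))
    (h : pvExpandAll move map l = some new) :
    ∀ c ∈ new, ∃ q ∈ l, ∃ cs, pvExpand move map q = some cs ∧ c ∈ cs := by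
  induction l generalizing new with
  | nil =>
    simp only [pvExpandAll] at h; cases h; simp
  | cons p ps ih =>
    simp only [pvExpandAll] at h
    cases hp : pvExpand move map p with
    | none => rw [hp] at h; cases h
    | some cs =>
      rw [hp] at h
      cases hr : pvExpandAll move map ps with
      | none => rw [hr] at h; cases h
      | some rest =>
        rw [hr] at h; cases h
        intro c hc
        rcases List.mem_append.mp hc with hc | hc
        · exact ⟨p, List.mem_cons_self .., cs, hp, hc⟩
        · obtain ⟨q, hq, cs', h1, h2⟩ := ih rest hr c hc
          exact ⟨q, List.mem_cons_of_mem _ hq, cs', h1, h2⟩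

theorem pvExpandAll_none (move : Int × Int) (map : List String) (l : List (Int × Int))
    (h : pvExpandAll move map l = none) : ∃ q ∈ l, pvExpand move map q = none := by
  induction l with
  | nil => simp [pvExpandAll] at h
  | cons p ps ih =>
    simp only [pvExpandAll] at h
    cases hp : pvExpand move map p with
    | none => exact ⟨p, List.mem_cons_self .., hp⟩
    | some cs =>
      rw [hp] at h
      cases hr : pvExpandAll move map ps with
      | none =>
        obtain ⟨q, hq, h2⟩ := ih hr
        exact ⟨q, List.mem_cons_of_mem _ hq, h2⟩
      | some rest => rw [hr] at h; cases h

-- A's recursion, one step, phrased through pvExpand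
theorem pvA_step (move : Int × Int) (map : List String) (n : Nat) (p : Int × Int) :
    canA_go move map (n + 1) p =
      (match pvExpand move map p with
       | none => false
       | some cs => cs.all fun c => canA_go move map n c) := by
  conv_lhs => rw [canA_go]
  unfold pvExpand
  split_ifs <;> simp [List.all]

theorem pvExpandAll_all (move : Int × Int) (map : List String) (n : Nat)
    (l new : List (Int × Int)) (h : pvExpandAll move map l = some new) :
    (l.all fun q => canA_go move map (n + 1) q) = (new.all fun c => canA_go move map n c) := by
  induction l generalizing new with
  | nil => simp only [pvExpandAll] at h; cases h; rfl
  | cons p ps ih =>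
    simp only [pvExpandAll] at h
    cases hp : pvExpand move map p with
    | none => rw [hp] at h; cases h
    | some cs =>
      rw [hp] at h
      cases hr : pvExpandAll move map ps with
      | none => rw [hr] at h; cases h
      | some rest =>
        rw [hr] at h; cases h
        have hA := pvA_step move map n p
        rw [hp] at hA
        simp only [List.all_cons, List.all_append, hA, ih rest hr]

theorem pv_all_dedup (f : (Int × Int) → Bool) (l : List (Int × Int)) :
    ((PySem.List.dedup l).all f) = (l.all f) := by
  refine Bool.eq_iff_iff.mpr ?_
  simp only [List.all_eq_true]
  constructor
  · intro h x hx
    exact h x ((PySem.List.mem_dedup l x).mpr hx)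
  · intro h x hx
    exact h x ((PySem.List.mem_dedup l x).mp hx)

-- the heart of the equivalence: with enough fuel, B's frontier loop computes the conjunction of
-- A's recursion over the frontier
theorem pvLoop_eq_all (move : Int × Int) (map : List String)
    (hz : ¬ (move.1 = 0 ∧ move.2 = 0)) :
    ∀ (n : Nat) (l : List (Int × Int)), (∀ p ∈ l, pvMeasure p move map < n) →
      pvLoopGo move map n l = (l.all fun q => canA_go move map n q) := by
  intro n
  induction n with
  | zero =>
    intro l hl
    cases l with
    | nil => rfl
    | cons p ps => exact absurd (hl p (List.mem_cons_self ..)) (Nat.not_lt_zero _)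
  | succ n ih =>
    intro l hl
    cases l with
    | nil => rfl
    | cons p ps =>
      rw [pvLoopGo]
      cases hx : pvExpandAll move map (p :: ps) with
      | none =>
        obtain ⟨q, hq, hqe⟩ := pvExpandAll_none move map (p :: ps) hx
        have hA := pvA_step move map n q
        rw [hqe] at hA
        symm
        simp only [List.all_eq_false]
        exact ⟨q, hq, by simp [hA]⟩
      | some new =>
        have hnew : ∀ c ∈ PySem.List.dedup new, pvMeasure c move map < n := by
          intro c hc
          obtain ⟨q, hq, cs, hcs, hcin⟩ :=
            pvExpandAll_some move map (p :: ps) new hx c ((PySem.List.mem_dedup new c).mp hc)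
          have h1 := pvExpand_measure move map q hz cs hcs c hcin
          have h2 := hl q hq
          omega
        show pvLoopGo move map n (PySem.List.dedup new) = _
        rw [ih (PySem.List.dedup new) hnew, pv_all_dedup, pvExpandAll_all move map n (p :: ps) new hx]

-- ===== VERDICT (by name: the statement is the Claim_ definition above) =====
theorem can_move_forward_spec : Claim_equal_can_move_forward := by
  intro robot move map _dom hpre
  unfold Spec_can_move_forward can_move_forward can_move_forward_alt
  have hz : ¬ (move.1 = 0 ∧ move.2 = 0) := by
    intro ⟨h1, h2⟩
    exact hpre.1 (Prod.ext h1 h2)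
  rw [pvLoop_eq_all move map hz (pvMeasure robot move map + 1) [robot]
      (by intro p hp; rw [List.mem_singleton] at hp; subst hp; omega)]
  simp
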